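-- pv_equiv track=rewrite | github.com/Skretzo/shortest-path | scripts/rebuild_bank_tsv.py | has_existing_tile_within
-- ===== SOURCE A (Python) =====
-- SNAP_RADIUS = 1
--
-- def has_existing_tile_within(
--     x: int, y: int, z: int, name: str,
--     existing_tiles_by_name: dict[str, list[tuple[int, int, int]]],
-- ) -> bool:
--     """True if a curated tile for ``name`` is within ``SNAP_RADIUS`` on the same plane."""
--     for ex, ey, ep in existing_tiles_by_name.get(name, []):
--         if ep != z:
--             continue
--         if max(abs(ex - x), abs(ey - y)) <= SNAP_RADIUS:
--             return True
--     return False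
-- ===== SOURCE B (Python) =====
-- SNAP_RADIUS = 1
--
-- def has_existing_tile_within(x, y, z, name, existing_tiles_by_name):
--     occupied = set(existing_tiles_by_name.get(name, []))
--     for dx in (-1, 0, 1):
--         for dy in (-1, 0, 1):
--             if (x + dx, y + dy, z) in occupied:
--                 return True
--     return False
-- ===== Notes on version B (the rewrite author's own statement) =====
-- stated objective: idiomatic
-- what changed: Instead of scanning every tile and computing a Chebyshev distance, B builds a set of the name's tiles once and probes the nine fixed neighbor cells (x+dx, y+dy, z) for membership.
import Mathlib
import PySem

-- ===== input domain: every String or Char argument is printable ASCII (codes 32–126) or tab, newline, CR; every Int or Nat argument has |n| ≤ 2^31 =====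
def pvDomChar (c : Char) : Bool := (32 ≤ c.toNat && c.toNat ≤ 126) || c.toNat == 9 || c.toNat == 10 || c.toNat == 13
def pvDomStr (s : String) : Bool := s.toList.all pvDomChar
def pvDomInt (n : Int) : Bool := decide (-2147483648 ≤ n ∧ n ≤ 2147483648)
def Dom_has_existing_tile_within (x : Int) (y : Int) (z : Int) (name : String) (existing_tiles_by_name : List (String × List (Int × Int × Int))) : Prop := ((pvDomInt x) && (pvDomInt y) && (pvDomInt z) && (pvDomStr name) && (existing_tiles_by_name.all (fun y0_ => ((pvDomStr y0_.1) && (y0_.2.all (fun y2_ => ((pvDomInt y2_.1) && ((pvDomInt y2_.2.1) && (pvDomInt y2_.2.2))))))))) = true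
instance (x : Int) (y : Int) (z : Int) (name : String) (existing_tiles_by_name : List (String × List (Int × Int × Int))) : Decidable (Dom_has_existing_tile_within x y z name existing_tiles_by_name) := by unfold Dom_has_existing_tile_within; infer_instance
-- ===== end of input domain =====

-- B replaces the per-tile Chebyshev scan with one set of the name's tiles probed at the nine fixed neighbor cells (idiomatic alternative).
-- ===== PORT A =====
-- the 'for ex, ey, ep in …' loop with early return
def pvA_loop (x : Int) (y : Int) (z : Int) : List (Int × Int × Int) → Bool
  | [] => false
  | (ex, ey, ep) :: rest =>
    if ep ≠ z then pvA_loop x y z rest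
    else if max |ex - x| |ey - y| ≤ (1 : Int) then true
    else pvA_loop x y z rest

def has_existing_tile_within (x : Int) (y : Int) (z : Int) (name : String) (existing_tiles_by_name : List (String × List (Int × Int × Int))) : Bool :=
  pvA_loop x y z ((match existing_tiles_by_name.find? (fun p => p.1 == name) with | some p => p.2 | none => []))

-- ===== PORT B =====
-- nested loop over the nine candidate offsets, early return on a set hit
def pvB_loop (occupied : PySem.Set (Int × Int × Int)) (x : Int) (y : Int) (z : Int) : List Int → Bool
  | [] => false
  | dx :: rest =>
    if pvB_inner occupied x y z dx [-1, 0, 1] then true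
    else pvB_loop occupied x y z rest
where
  pvB_inner (occupied : PySem.Set (Int × Int × Int)) (x : Int) (y : Int) (z : Int) (dx : Int) : List Int → Bool
  | [] => false
  | dy :: rest =>
    if PySem.Set.contains occupied (x + dx, y + dy, z) then true
    else pvB_inner occupied x y z dx rest

def has_existing_tile_within_alt (x : Int) (y : Int) (z : Int) (name : String) (existing_tiles_by_name : List (String × List (Int × Int × Int))) : Bool :=
  let occupied := PySem.Set.ofList ((match existing_tiles_by_name.find? (fun p => p.1 == name) with | some p => p.2 | none => []))
  pvB_loop occupied x y z [-1, 0, 1]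

-- ===== PRECONDITION & SPEC =====
def Spec_has_existing_tile_within (x : Int) (y : Int) (z : Int) (name : String) (existing_tiles_by_name : List (String × List (Int × Int × Int))) (out : Bool) : Prop := out = has_existing_tile_within_alt x y z name existing_tiles_by_name
instance (x : Int) (y : Int) (z : Int) (name : String) (existing_tiles_by_name : List (String × List (Int × Int × Int))) (out : Bool) : Decidable (Spec_has_existing_tile_within x y z name existing_tiles_by_name out) := by unfold Spec_has_existing_tile_within; infer_instance

-- ===== CLAIM (what is proved, stated in full; the proofs are below) =====
def Claim_equal_has_existing_tile_within : Prop := ∀ (x : Int) (y : Int) (z : Int) (name : String) (existing_tiles_by_name : List (String × List (Int × Int × Int))), Dom_has_existing_tile_within x y z name existing_tiles_by_name → Spec_has_existing_tile_within x y z name existing_tiles_by_name (has_existing_tile_within x y z name existing_tiles_by_name)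



-- ===== LEMMAS =====
theorem pvA_loop_iff (x y z : Int) (ts : List (Int × Int × Int)) :
    pvA_loop x y z ts = true ↔
      ∃ t ∈ ts, t.2.2 = z ∧ |t.1 - x| ≤ 1 ∧ |t.2.1 - y| ≤ 1 := by
  induction ts with
  | nil => simp [pvA_loop]
  | cons h rest ih =>
    obtain ⟨ex, ey, ep⟩ := h
    simp only [pvA_loop]
    split_ifs with h1 h2 <;>
      simp_all

theorem pvB_inner_iff (occ : PySem.Set (Int × Int × Int)) (x y z dx : Int) (dys : List Int) :
    pvB_loop.pvB_inner occ x y z dx dys = true ↔ ∃ dy ∈ dys, (x + dx, y + dy, z) ∈ occ := by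
  induction dys with
  | nil => simp [pvB_loop.pvB_inner]
  | cons d rest ih =>
    simp only [pvB_loop.pvB_inner]
    split_ifs with h1 <;> simp_all [PySem.Set.contains]

theorem pvB_loop_iff (occ : PySem.Set (Int × Int × Int)) (x y z : Int) (dxs : List Int) :
    pvB_loop occ x y z dxs = true ↔
      ∃ dx ∈ dxs, ∃ dy ∈ ([-1, 0, 1] : List Int), (x + dx, y + dy, z) ∈ occ := by
  induction dxs with
  | nil => simp [pvB_loop]
  | cons d rest ih =>
    simp only [pvB_loop]
    split_ifs with h1 <;> simp_all [pvB_inner_iff]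

-- ===== VERDICT =====
theorem has_existing_tile_within_spec : Claim_equal_has_existing_tile_within := by
  intro x y z name d _
  unfold Spec_has_existing_tile_within
  unfold has_existing_tile_within has_existing_tile_within_alt
  set ts := (match d.find? (fun p => p.1 == name) with | some p => p.2 | none => []) with hts
  simp only []
  rcases hA : pvA_loop x y z ts with _ | _ <;>
  rcases hB : pvB_loop (PySem.Set.ofList ts) x y z [-1, 0, 1] with _ | _
  · rfl
  · exfalso
    rw [pvB_loop_iff] at hB
    obtain ⟨dx, hdx, dy, hdy, hmem⟩ := hB
    rw [PySem.Set.mem_ofList] at hmem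
    have : pvA_loop x y z ts = true := by
      rw [pvA_loop_iff]
      have hdx' : dx = -1 ∨ dx = 0 ∨ dx = 1 := by simpa using hdx
      have hdy' : dy = -1 ∨ dy = 0 ∨ dy = 1 := by simpa using hdy
      refine ⟨(x + dx, y + dy, z), hmem, rfl, ?_, ?_⟩ <;>
        · dsimp only; rw [abs_le]; rcases hdx' with rfl | rfl | rfl <;> rcases hdy' with rfl | rfl | rfl <;>
            constructor <;> omega
    simp [this] at hA
  · exfalso
    rw [pvA_loop_iff] at hA
    obtain ⟨⟨ex, ey, ep⟩, hmem, hz, hx, hy⟩ := hA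
    dsimp only at hx hy hz
    rw [abs_le] at hx hy
    have : pvB_loop (PySem.Set.ofList ts) x y z [-1, 0, 1] = true := by
      rw [pvB_loop_iff]
      refine ⟨ex - x, ?_, ey - y, ?_, ?_⟩
      · simp; omega
      · simp; omega
      · rw [PySem.Set.mem_ofList]
        have h1 : x + (ex - x) = ex := by ring
        have h2 : y + (ey - y) = ey := by ring
        rw [h1, h2]
        simp_all
    simp [this] at hB
  · rfl
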